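-- pv_equiv track=rewrite | github.com/binref/refinery | refinery/lib/scripts/ps1/token.py | _strip_backtick_noop
-- ===== SOURCE A (Python) =====
-- def _strip_backtick_noop(name: str) -> str:
--     result: list[str] = []
--     i = 0
--     while i < len(name):
--         if name[i] == '`' and i + 1 < len(name):
--             result.append(name[i + 1])
--             i += 2
--             continue
--         result.append(name[i])
--         i += 1
--     return ''.join(result)
-- ===== SOURCE B (Python) =====
-- def _strip_backtick_noop(name: str) -> str:
--     # Split on the backtick delimiter once; each piece after the first starts
--     # with the character that was escaped (kept verbatim).  An empty piece means
--     # the escaped character was itself the separator, or an unpaired final escape.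
--     parts = name.split('`')
--     out = [parts[0]]
--     k = 1
--     while k < len(parts):
--         p = parts[k]
--         k += 1
--         if p:
--             out.append(p)
--         else:
--             out.append('`')
--             if k < len(parts):
--                 out.append(parts[k])
--                 k += 1
--     return ''.join(out)
-- ===== Notes on version B (the rewrite author's own statement) =====
-- stated objective: faster
-- what changed: Replaces the per-character index loop with a single split('`') followed by a short reassembly pass over the (few) pieces, so the character-level work is done by the C-level str.split instead of a Python loop.
import Mathlib
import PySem

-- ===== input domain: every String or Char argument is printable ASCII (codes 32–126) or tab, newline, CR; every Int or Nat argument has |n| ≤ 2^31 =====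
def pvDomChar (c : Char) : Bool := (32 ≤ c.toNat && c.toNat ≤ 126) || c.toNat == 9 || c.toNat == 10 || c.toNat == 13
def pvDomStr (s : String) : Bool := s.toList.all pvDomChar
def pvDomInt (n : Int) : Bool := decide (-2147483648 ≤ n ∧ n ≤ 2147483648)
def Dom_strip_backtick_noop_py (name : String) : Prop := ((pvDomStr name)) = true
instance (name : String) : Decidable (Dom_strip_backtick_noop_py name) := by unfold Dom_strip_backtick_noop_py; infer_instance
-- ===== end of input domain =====

-- B replaces A's per-character index loop by one split on '`' plus a reassembly
-- pass over the pieces (objective: faster by a constant factor in Python).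

-- ===== PORT A =====
-- the while-loop of A: index i, accumulator `result`
def pvALoop (cs : List Char) (i : Nat) (result : List Char) : List Char :=
  if h : i < cs.length then
    if h2 : cs[i] = '`' ∧ i + 1 < cs.length then
      pvALoop cs (i + 2) (result ++ [cs[i + 1]'h2.2])
    else
      pvALoop cs (i + 1) (result ++ [cs[i]])
  else result
termination_by cs.length - i

def strip_backtick_noop_py (name : String) : String :=
  String.ofList (pvALoop name.toList 0 [])

-- ===== PORT B =====
-- the while-loop of B over parts[1:]: each piece is appended verbatim; an empty
-- piece stands for an escaped separator character (consuming the next piece)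
-- or an unpaired final escape
def pvBLoop : List (List Char) → List (List Char)
  | [] => []
  | p :: rest =>
    if p ≠ [] then p :: pvBLoop rest
    else
      match rest with
      | [] => [['`']]
      | q :: rest' => ['`'] :: q :: pvBLoop rest'

-- name.split('`') is PySem.Chars.splitOn; ''.join(out) is List.flatten
def strip_backtick_noop_py_alt (name : String) : String :=
  match PySem.Chars.splitOn name.toList ['`'] with
  | [] => ""  -- unreachable: str.split never returns an empty list
  | p0 :: rest => String.ofList (List.flatten (p0 :: pvBLoop rest))

-- ===== PRECONDITION & SPEC =====
def Spec_strip_backtick_noop_py (name : String) (out : String) : Prop := out = strip_backtick_noop_py_alt name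
instance (name : String) (out : String) : Decidable (Spec_strip_backtick_noop_py name out) := by unfold Spec_strip_backtick_noop_py; infer_instance

-- ===== CLAIM (what is proved, stated in full; the proofs are below) =====
def Claim_equal_strip_backtick_noop_py : Prop := ∀ (name : String), Dom_strip_backtick_noop_py name → Spec_strip_backtick_noop_py name (strip_backtick_noop_py name)

-- ===== LEMMAS AND PROOFS =====

-- the common specification: remove each backtick together with nothing,
-- keeping the character it escapes; an unpaired final escape character is kept
def pvStrip : List Char → List Char
  | [] => []
  | c :: rest =>
    if c = '`' then
      match rest with
      | [] => ['`']
      | d :: rest' => d :: pvStrip rest'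
    else c :: pvStrip rest

-- structural characterisation of splitting on the single character '`'
def pvSplit : List Char → List (List Char)
  | [] => [[]]
  | c :: rest => if c = '`' then [] :: pvSplit rest else (pvSplit rest).modifyHead (c :: ·)

theorem pvSplit_ne_nil (l : List Char) : pvSplit l ≠ [] := by
  induction l with
  | nil => simp [pvSplit]
  | cons c rest ih =>
    simp only [pvSplit]
    split
    · simp
    · cases h : pvSplit rest with
      | nil => exact absurd h ih
      | cons a b => simp [List.modifyHead]

theorem pvALoop_eq (cs : List Char) (i : Nat) (result : List Char) :
    pvALoop cs i result = result ++ pvStrip (cs.drop i) := by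
  refine pvALoop.induct cs
    (fun i result => pvALoop cs i result = result ++ pvStrip (cs.drop i)) ?_ ?_ ?_ i result
  · intro i result h h2 ih
    rw [pvALoop, dif_pos h, dif_pos h2, ih]
    have hd1 : cs.drop i = cs[i] :: cs.drop (i + 1) := List.drop_eq_getElem_cons h
    have hd2 : cs.drop (i + 1) = cs[i + 1]'h2.2 :: cs.drop (i + 2) :=
      List.drop_eq_getElem_cons h2.2
    rw [hd1, hd2]
    rw [show pvStrip (cs[i] :: cs[i + 1] :: List.drop (i + 2) cs)
          = cs[i + 1] :: pvStrip (List.drop (i + 2) cs) from by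
        rw [pvStrip.eq_def]; simp [h2.1]]
    simp
  · intro i result h h2 ih
    rw [pvALoop, dif_pos h, dif_neg h2, ih]
    have hd1 : cs.drop i = cs[i] :: cs.drop (i + 1) := List.drop_eq_getElem_cons h
    rw [hd1]
    by_cases hc : cs[i] = '`'
    · have hlen : ¬ i + 1 < cs.length := by
        intro hlt; exact h2 ⟨hc, hlt⟩
      have hnil : cs.drop (i + 1) = [] := by
        apply List.drop_eq_nil_of_le; omega
      rw [hnil, hc]
      simp [pvStrip]
    · have hstep : pvStrip (cs[i] :: cs.drop (i + 1)) = cs[i] :: pvStrip (cs.drop (i + 1)) := by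
        rw [pvStrip.eq_def]; simp [hc]
      rw [hstep]; simp
  · intro i result h
    rw [pvALoop, dif_neg h]
    have hnil : cs.drop i = [] := by
      apply List.drop_eq_nil_of_le; omega
    rw [hnil]
    simp [pvStrip]

-- pvSplit l is never empty, packaged as a destructuring
theorem pvSplit_cons (l : List Char) : ∃ h t, pvSplit l = h :: t := by
  cases hsp : pvSplit l with
  | nil => exact absurd hsp (pvSplit_ne_nil l)
  | cons h t => exact ⟨h, t, rfl⟩

-- PySem.Chars.splitOn.go on the one-character separator '`' computes pvSplit
theorem pvGo_eq (l : List Char) : ∀ (fuel : Nat) (cur : List Char) (acc : List (List Char)),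
    l.length ≤ fuel →
    PySem.Chars.splitOn.go ['`'] fuel l cur acc
      = acc.reverse ++ (pvSplit l).modifyHead (cur.reverse ++ ·) := by
  induction l with
  | nil =>
    intro fuel cur acc _
    cases fuel <;> simp [PySem.Chars.splitOn.go.eq_def, pvSplit, List.modifyHead]
  | cons c rest ih =>
    intro fuel cur acc hfuel
    cases fuel with
    | zero => simp at hfuel
    | succ f =>
      rw [PySem.Chars.splitOn.go.eq_def]
      simp only [List.length_cons, Nat.add_le_add_iff_right] at hfuel
      by_cases hc : c = '`'
      · have hpre : List.isPrefixOf ['`'] (c :: rest) = true := by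
          simp [List.isPrefixOf, hc]
        simp only [hpre, if_pos, List.length_cons, List.length_nil, List.drop_succ_cons,
          List.drop_zero, Nat.zero_add]
        rw [ih f [] (cur.reverse :: acc) hfuel]
        simp only [pvSplit, hc, if_pos]
        obtain ⟨h, t, hht⟩ := pvSplit_cons rest
        simp [hht, List.modifyHead]
      · have hpre : List.isPrefixOf ['`'] (c :: rest) = false := by
          simp [List.isPrefixOf]; exact fun hx => absurd hx.symm hc
        simp only [hpre, Bool.false_eq_true, if_false]
        rw [ih f (c :: cur) acc hfuel]
        simp only [pvSplit, hc, if_neg, not_false_iff]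
        obtain ⟨h, t, hht⟩ := pvSplit_cons rest
        simp [hht, List.modifyHead]

theorem pvSplitOn_eq (l : List Char) : PySem.Chars.splitOn l ['`'] = pvSplit l := by
  rw [PySem.Chars.splitOn, pvGo_eq l (l.length + 1) [] [] (by omega)]
  obtain ⟨h, t, hht⟩ := pvSplit_cons l
  simp [hht, List.modifyHead]

-- B's reassembly of the pieces rebuilds pvStrip
theorem pvBLoop_eq (l : List Char) : ∀ (h : List Char) (t : List (List Char)),
    pvSplit l = h :: t → h ++ (pvBLoop t).flatten = pvStrip l := by
  induction l using pvStrip.induct with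
  | case1 =>
    intro h t hsp
    simp only [pvSplit] at hsp
    injection hsp with hh ht
    subst hh; subst ht
    simp [pvBLoop, pvStrip]
  | case2 =>
    -- l = ['`']
    intro h t hsp
    simp only [pvSplit, if_pos, List.modifyHead] at hsp
    injection hsp with hh ht
    subst hh; subst ht
    simp [pvBLoop, pvStrip]
  | case3 d rest' ih =>
    -- l = '`' :: d :: rest'
    intro h t hsp
    simp only [pvSplit, if_pos] at hsp
    injection hsp with hh ht
    subst hh
    obtain ⟨h2, t2, hht2⟩ := pvSplit_cons rest'
    by_cases hd : d = '`'
    · -- escaped backtick: the next piece is empty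
      rw [if_pos hd, hht2] at ht
      subst ht
      simp only [pvBLoop, ne_eq, not_true_eq_false, if_false, List.flatten_cons,
        List.nil_append, List.singleton_append]
      rw [ih h2 t2 hht2]
      subst hd
      rw [show pvStrip ('`' :: '`' :: rest') = '`' :: pvStrip rest' from by
        rw [pvStrip.eq_def]; simp]
    · -- ordinary escaped character d
      rw [if_neg hd, hht2] at ht
      simp only [List.modifyHead] at ht
      subst ht
      rw [show pvBLoop ((d :: h2) :: t2) = (d :: h2) :: pvBLoop t2 from by
        rw [pvBLoop.eq_def]; simp]
      simp only [List.flatten_cons, List.cons_append]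
      rw [ih h2 t2 hht2]
      rw [show pvStrip ('`' :: d :: rest') = d :: pvStrip rest' from by
        rw [pvStrip.eq_def]; simp]
      simp
  | case4 d rest' hd ih =>
    -- leading ordinary character d
    intro h t hsp
    simp only [pvSplit, hd, if_neg, not_false_iff] at hsp
    obtain ⟨h2, t2, hht2⟩ := pvSplit_cons rest'
    rw [hht2] at hsp
    simp only [List.modifyHead] at hsp
    injection hsp with hh ht
    subst hh; subst ht
    simp only [List.cons_append]
    rw [ih h2 t2 hht2]
    rw [show pvStrip (d :: rest') = d :: pvStrip rest' from by
      rw [pvStrip.eq_def]; simp [hd]]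

-- ===== VERDICT (by name: the statement is the Claim_ definition above) =====
theorem strip_backtick_noop_py_spec : Claim_equal_strip_backtick_noop_py := by
  intro name _
  unfold Spec_strip_backtick_noop_py strip_backtick_noop_py strip_backtick_noop_py_alt
  rw [pvALoop_eq, pvSplitOn_eq]
  obtain ⟨h, t, hht⟩ := pvSplit_cons name.toList
  rw [hht]
  simp only [List.drop_zero, List.nil_append]
  rw [← pvBLoop_eq name.toList h t hht]
  simp
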